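-- pv_equiv track=rewrite | github.com/SupanutT/hardest-courses-i-have-learned | Algorithm/a62_q1b_virus/finish.py | isVirus
-- ===== SOURCE A (Python) =====
-- def isVirus(k, sol):
--     if (k==1):
--         if (sol == "01"): return True
--         else: return False
--     normalA = isVirus(k-1, sol[:int(len(sol)/2)])
--     reverseA = isVirus(k-1, sol[:int(len(sol)/2)][::-1])
--     normalB = isVirus(k-1, sol[int(len(sol)/2):])
--     return (normalA or reverseA) and normalB
-- ===== SOURCE B (Python) =====
-- def isVirus(k, sol):
--     # Tupled recursion: each call returns (isVirus(j, s), isVirus(j, s[::-1])),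
--     # so the reversed-half subproblem needs no third recursive call and no string reversal.
--     def pair(j, s):
--         if j == 1:
--             return (s == "01", s == "10")
--         if len(s) < 2:
--             return (False, False)
--         m = len(s) // 2
--         p1, q1 = pair(j - 1, s[:m])
--         p2, q2 = pair(j - 1, s[m:])
--         return ((p1 or q1) and p2, (q2 or p2) and q1)
--     return pair(k, sol)[0]
-- ===== Notes on version B (the rewrite author's own statement) =====
-- stated objective: alternative
-- what changed: Replaces A's three-way recursion (which recurses separately on the reversed first half) by a tupled two-way recursion returning the pair (isVirus(j,s), isVirus(j,reversed s)), with an early exit on strings shorter than 2, so no string is ever reversed and no third recursive call is made.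
import Mathlib
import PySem

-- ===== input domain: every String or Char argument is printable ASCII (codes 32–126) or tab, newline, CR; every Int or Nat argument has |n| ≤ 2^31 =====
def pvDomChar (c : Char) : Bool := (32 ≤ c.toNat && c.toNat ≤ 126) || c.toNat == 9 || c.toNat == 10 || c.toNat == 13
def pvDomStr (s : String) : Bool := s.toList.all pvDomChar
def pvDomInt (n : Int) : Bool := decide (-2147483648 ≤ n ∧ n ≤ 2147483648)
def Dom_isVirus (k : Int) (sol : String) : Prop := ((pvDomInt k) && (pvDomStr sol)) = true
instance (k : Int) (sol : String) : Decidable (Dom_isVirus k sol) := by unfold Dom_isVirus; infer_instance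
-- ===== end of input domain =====

-- B replaces A's three-way recursion by a tupled two-way recursion returning
-- (isVirus(j,s), isVirus(j,reversed s)), with an early exit on strings shorter than 2;
-- objective: alternative (no reversal, no third recursive call).

-- ===== PORT A =====
-- Literal port of A's recursion; the Int argument k is handled by the wrapper `isVirus`:
-- for k ≥ 1 the recursion is on k itself (here k.toNat), for k ≤ 0 Python recurses forever
-- (RecursionError) — that totalization guard is excluded by Pre_isVirus.
-- `int(len(sol)/2)` = len/2 (Nat division) since len ≥ 0; `[::-1]` is reverse
-- (PySem.List.slice?_none_none_neg_one).
def isVirusGo : Nat → List Char → Bool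
  | 0, _ => false                                   -- unreachable under Pre_ (guard only)
  | 1, s => decide (s = ['0', '1'])                 -- if sol == "01"
  | n + 2, s =>
    let m : Nat := s.length / 2
    let normalA := isVirusGo (n + 1) (PySem.List.slice s none (some (m : Int)))
    let reverseA := isVirusGo (n + 1) (PySem.List.slice s none (some (m : Int))).reverse
    let normalB := isVirusGo (n + 1) (PySem.List.slice s (some (m : Int)) none)
    (normalA || reverseA) && normalB

def isVirus (k : Int) (sol : String) : Bool :=
  if k ≤ 0 then false                               -- Python diverges here; outside Pre_
  else isVirusGo k.toNat sol.toList

-- ===== PORT B =====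
-- Port of Source B's helper `pair`: s[:m] / s[m:] with 0 ≤ m ≤ len(s) are exactly take/drop
-- (PySem.List.slice_to_natCast / slice_from_natCast); recursion terminates because the
-- string strictly shrinks once its length is ≥ 2.
def isVirusPair (k : Int) (s : List Char) : Bool × Bool :=
  if k = 1 then (decide (s = ['0', '1']), decide (s = ['1', '0']))
  else if s.length < 2 then (false, false)
  else
    let m : Nat := s.length / 2
    let a := isVirusPair (k - 1) (s.take m)
    let b := isVirusPair (k - 1) (s.drop m)
    ((a.1 || a.2) && b.1, (b.2 || b.1) && a.2)
termination_by s.length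
decreasing_by
  · simp only [List.length_take]; omega
  · simp only [List.length_drop]; omega

def isVirus_alt (k : Int) (sol : String) : Bool :=
  (isVirusPair k sol.toList).1

-- ===== PRECONDITION & SPEC =====
-- Pre_ excludes exactly k ≤ 0, where A's recursion never reaches its base case and Python
-- raises RecursionError.
def Pre_isVirus (k : Int) (sol : String) : Prop := 1 ≤ k
instance (k : Int) (sol : String) : Decidable (Pre_isVirus k sol) := by unfold Pre_isVirus; infer_instance
def pvWitness_isVirus : Int × String := (1, "01")

def Spec_isVirus (k : Int) (sol : String) (out : Bool) : Prop := out = isVirus_alt k sol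
instance (k : Int) (sol : String) (out : Bool) : Decidable (Spec_isVirus k sol out) := by unfold Spec_isVirus; infer_instance

-- ===== CLAIM (what is proved, stated in full; the proofs are below) =====
def Claim_equal_isVirus : Prop := ∀ (k : Int) (sol : String), Dom_isVirus k sol → Pre_isVirus k sol → Spec_isVirus k sol (isVirus k sol)

-- ===== LEMMAS AND PROOFS =====

-- A accepted string at level n+1 has length exactly 2^(n+1).
lemma isVirusGo_length : ∀ (n : Nat) (s : List Char), isVirusGo (n + 1) s = true → s.length = 2 ^ (n + 1) := by
  intro n
  induction n with
  | zero =>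
    intro s h
    simp only [isVirusGo, decide_eq_true_eq] at h
    subst h; rfl
  | succ n ih =>
    intro s h
    simp only [isVirusGo, PySem.List.slice_to_natCast, PySem.List.slice_from_natCast,
      Bool.and_eq_true, Bool.or_eq_true] at h
    obtain ⟨hA, hB⟩ := h
    have hdrop := ih _ hB
    simp only [List.length_drop] at hdrop
    have htake : (s.take (s.length / 2)).length = 2 ^ (n + 1) := by
      rcases hA with hA | hA
      · exact ih _ hA
      · have := ih _ hA; simpa using this
    simp only [List.length_take] at htake
    have h2 : 2 ^ (n + 2) = 2 ^ (n + 1) + 2 ^ (n + 1) := by ring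
    omega

-- Main invariant: the pair recursion computes A's value on s together with A's value on s.reverse.
lemma isVirusPair_spec : ∀ (n : Nat) (s : List Char),
    isVirusPair ((n + 1 : Nat) : Int) s = (isVirusGo (n + 1) s, isVirusGo (n + 1) s.reverse) := by
  intro n
  induction n with
  | zero =>
    intro s
    rw [isVirusPair]
    simp only [isVirusGo]
    simp [List.reverse_eq_iff]
  | succ n ih =>
    intro s
    rw [isVirusPair]
    have hk1 : ((n + 2 : Nat) : Int) ≠ 1 := by omega
    rw [if_neg hk1]
    have hk : ((n + 2 : Nat) : Int) - 1 = ((n + 1 : Nat) : Int) := by push_cast; ring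
    by_cases hlen : s.length < 2
    · rw [if_pos hlen]
      have h1 : isVirusGo (n + 2) s = false := by
        cases h : isVirusGo (n + 2) s with
        | false => rfl
        | true =>
          have := isVirusGo_length (n + 1) s h
          have h2 : 2 ^ n ≥ 1 := Nat.one_le_two_pow
          have h3 : 2 ^ (n + 2) = 4 * 2 ^ n := by ring
          omega
      have h2 : isVirusGo (n + 2) s.reverse = false := by
        cases h : isVirusGo (n + 2) s.reverse with
        | false => rfl
        | true =>
          have := isVirusGo_length (n + 1) s.reverse h
          simp only [List.length_reverse] at this
          have h2 : 2 ^ n ≥ 1 := Nat.one_le_two_pow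
          have h3 : 2 ^ (n + 2) = 4 * 2 ^ n := by ring
          omega
      rw [h1, h2]
    · rw [if_neg hlen]
      simp only [hk, ih]
      set m : Nat := s.length / 2 with hm
      have hmle : m ≤ s.length := by omega
      have hTlen : (s.take m).length = m := by simp [List.length_take]; omega
      have hDlen : (s.drop m).length = s.length - m := by simp
      -- the forward component and the reverse component, against A's unfolding on s and s.reverse
      have hA : isVirusGo (n + 2) s =
          ((isVirusGo (n + 1) (s.take m) || isVirusGo (n + 1) (s.take m).reverse) &&
            isVirusGo (n + 1) (s.drop m)) := by
        simp only [isVirusGo, PySem.List.slice_to_natCast, PySem.List.slice_from_natCast, ← hm]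
      have hAr : isVirusGo (n + 2) s.reverse =
          ((isVirusGo (n + 1) (s.reverse.take m) || isVirusGo (n + 1) (s.reverse.take m).reverse) &&
            isVirusGo (n + 1) (s.reverse.drop m)) := by
        simp only [isVirusGo, PySem.List.slice_to_natCast, PySem.List.slice_from_natCast,
          List.length_reverse, ← hm]
      rw [hA, hAr]
      by_cases hpar : s.length % 2 = 0
      · -- even length: the halves of s.reverse are the reversed halves of s
        have hmm : s.length - m = m := by omega
        have hrt : s.reverse.take m = (s.drop m).reverse := by
          rw [List.take_reverse, hmm]
        have hrd : s.reverse.drop m = (s.take m).reverse := by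
          rw [List.drop_reverse, hmm]
        rw [hrt, hrd, List.reverse_reverse]
      · -- odd length: the second components are both false by the length lemma
        have hq : ((isVirusGo (n + 1) (s.drop m).reverse || isVirusGo (n + 1) (s.drop m)) &&
            isVirusGo (n + 1) (s.take m).reverse) = false := by
          cases h1 : isVirusGo (n + 1) (s.take m).reverse with
          | false => simp
          | true =>
            have hT := isVirusGo_length n _ h1
            simp only [List.length_reverse, hTlen] at hT
            cases h2 : isVirusGo (n + 1) (s.drop m).reverse with
            | false =>
              cases h3 : isVirusGo (n + 1) (s.drop m) with
              | false => simp
              | true =>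
                have hD := isVirusGo_length n _ h3
                rw [hDlen] at hD; omega
            | true =>
              have hD := isVirusGo_length n _ h2
              simp only [List.length_reverse, hDlen] at hD
              omega
        have hq' : ((isVirusGo (n + 1) (s.reverse.take m) ||
            isVirusGo (n + 1) (s.reverse.take m).reverse) &&
            isVirusGo (n + 1) (s.reverse.drop m)) = false := by
          have hRTlen : (s.reverse.take m).length = m := by
            simp [List.length_take, List.length_reverse]; omega
          have hRDlen : (s.reverse.drop m).length = s.length - m := by simp
          cases h1 : isVirusGo (n + 1) (s.reverse.drop m) with
          | false => simp
          | true =>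
            have hD := isVirusGo_length n _ h1
            rw [hRDlen] at hD
            cases h2 : isVirusGo (n + 1) (s.reverse.take m) with
            | false =>
              cases h3 : isVirusGo (n + 1) (s.reverse.take m).reverse with
              | false => simp
              | true =>
                have hT := isVirusGo_length n _ h3
                simp only [List.length_reverse, hRTlen] at hT
                omega
            | true =>
              have hT := isVirusGo_length n _ h2
              rw [hRTlen] at hT
              omega
        rw [Prod.mk.injEq]
        exact ⟨rfl, by rw [hq, hq']⟩

-- ===== VERDICT (by name: the statement is the Claim_ definition above) =====
theorem isVirus_spec : Claim_equal_isVirus := by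
  intro k sol _ hpre
  unfold Spec_isVirus isVirus isVirus_alt
  have hk0 : ¬ k ≤ 0 := by unfold Pre_isVirus at hpre; omega
  rw [if_neg hk0]
  have hkn : 1 ≤ k.toNat := by omega
  obtain ⟨n, hn⟩ : ∃ n, k.toNat = n + 1 := ⟨k.toNat - 1, by omega⟩
  have hkcast : k = ((n + 1 : Nat) : Int) := by omega
  rw [hn, hkcast, isVirusPair_spec]
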